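-- pv_equiv track=rewrite | github.com/Oukey/Data_Structures_and_Algorithms | Tree/aBST/BBSTA.py | depth_calc
-- ===== SOURCE A (Python) =====
-- def depth_calc(array):  # доп. метод
--     '''
--     Метод расчета глубины
--     параметр array - исходный массив
--     возвращает кортеж с параметрами: 0 - глубина дерева, 1 - длина массива
--     '''
--     if array:
--         len_array = 0
--         depth_tree = 0
--         while len_array < len(array):
--             depth_tree += 1
--             len_array = 2 ** (depth_tree + 1) - 1
--         return depth_tree, len_array
--     else:
--         return 0, 0
-- ===== SOURCE B (Python) =====
-- def depth_calc(array):
--     if not array: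
--         return 0, 0
--     depth = max(1, len(array).bit_length() - 1)
--     return depth, 2 ** (depth + 1) - 1
-- ===== Notes on version B (the rewrite author's own statement) =====
-- stated objective: simpler
-- what changed: Replaced the doubling while-loop with a closed-form bit_length computation of the depth (clamped to at least 1, matching the loop's always-increment behaviour) and a single power for the capacity.
import Mathlib
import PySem

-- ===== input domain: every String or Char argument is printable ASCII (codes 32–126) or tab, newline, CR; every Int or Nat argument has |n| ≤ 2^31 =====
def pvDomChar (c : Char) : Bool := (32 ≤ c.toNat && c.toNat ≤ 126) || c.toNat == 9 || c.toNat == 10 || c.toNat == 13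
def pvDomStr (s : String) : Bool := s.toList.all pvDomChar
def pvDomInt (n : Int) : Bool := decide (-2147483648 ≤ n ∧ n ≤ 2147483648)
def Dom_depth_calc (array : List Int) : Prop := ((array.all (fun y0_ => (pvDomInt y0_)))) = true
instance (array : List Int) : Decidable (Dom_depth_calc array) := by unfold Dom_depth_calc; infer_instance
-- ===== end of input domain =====

-- B replaces A's growing while-loop by a closed-form bit-length formula; objective: simpler.

-- ===== PORT A =====
-- A's while-loop; depth_tree and len_array are always non-negative, so they are
-- carried as Nat (2^(d+1)-1 ≥ 0, subtraction is exact). The fuel argument only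
-- makes the recursion total; with fuel ≥ n+1 it is never exhausted.
def depthLoop : Nat → Nat → Nat → Nat → Nat × Nat
  | 0, _, d, l => (d, l)
  | f + 1, n, d, l => if l < n then depthLoop f n (d + 1) (2 ^ (d + 1 + 1) - 1) else (d, l)

def depth_calc (array : List Int) : Int × Int :=
  if array.isEmpty then (0, 0)
  else
    let p := depthLoop (array.length + 1) array.length 0 0
    ((p.1 : Int), (p.2 : Int))

-- ===== PORT B =====
-- Python's n.bit_length() is Nat.size n.
def depth_calc_alt (array : List Int) : Int × Int :=
  if array.isEmpty then (0, 0)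
  else
    let d := max 1 (array.length.size - 1)
    ((d : Int), ((2 ^ (d + 1) - 1 : Nat) : Int))

-- ===== PRECONDITION & SPEC =====
def Spec_depth_calc (array : List Int) (out : Int × Int) : Prop := out = depth_calc_alt array
instance (array : List Int) (out : Int × Int) : Decidable (Spec_depth_calc array out) := by unfold Spec_depth_calc; infer_instance

-- ===== CLAIM (what is proved, stated in full; the proofs are below) =====
def Claim_equal_depth_calc : Prop := ∀ (array : List Int), Dom_depth_calc array → Spec_depth_calc array (depth_calc array)

-- ===== LEMMAS AND PROOFS =====

-- From a loop state (d, 2^(d+1)-1) with 1 ≤ d ≤ D := max 1 (size n - 1) and enough fuel,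
-- the loop ends at (D, 2^(D+1)-1).
lemma depthLoop_from (n : Nat) (hn : 1 ≤ n) :
    ∀ (f d : Nat), 1 ≤ d → d ≤ max 1 (n.size - 1) → max 1 (n.size - 1) - d < f →
      depthLoop f n d (2 ^ (d + 1) - 1) = (max 1 (n.size - 1), 2 ^ (max 1 (n.size - 1) + 1) - 1) := by
  intro f
  induction f with
  | zero => intro d _ _ h; omega
  | succ f ih =>
    intro d hd1 hdD hf
    rw [depthLoop]
    by_cases h : 2 ^ (d + 1) - 1 < n
    · -- loop continues: n ≥ 2^(d+1), so size n ≥ d+2, hence d < D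
      have h2 : 2 ^ (d + 1) ≤ n := by
        have := Nat.one_le_two_pow (n := d + 1); omega
      have hsz : d + 1 < n.size := Nat.lt_size.mpr h2
      have hlt : d < max 1 (n.size - 1) := by omega
      simp only [if_pos h]
      exact ih (d + 1) (by omega) (by omega) (by omega)
    · -- loop stops: n ≤ 2^(d+1)-1, so size n ≤ d+1, hence D ≤ d, and with d ≤ D, d = D
      have hlt : n < 2 ^ (d + 1) := by
        have := Nat.one_le_two_pow (n := d + 1); omega
      have hsz : n.size ≤ d + 1 := Nat.size_le.mpr hlt
      have hD : max 1 (n.size - 1) = d := by omega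
      simp only [if_neg h, hD]

-- ===== VERDICT (by name: the statement is the Claim_ definition above) =====
theorem depth_calc_spec : Claim_equal_depth_calc := by
  intro array _
  unfold Spec_depth_calc depth_calc depth_calc_alt
  by_cases he : array.isEmpty
  · simp [he]
  · simp only [he, if_false, Bool.false_eq_true]
    have hn : 1 ≤ array.length := by
      cases array with
      | nil => simp at he
      | cons a t => simp
    set n := array.length with hdef
    have hDle : max 1 (n.size - 1) ≤ n := by
      have : n.size ≤ n + 1 := Nat.size_le.mpr (by
        calc n < 2 ^ n := Nat.lt_two_pow_self
        _ ≤ 2 ^ (n + 1) := Nat.pow_le_pow_right (by norm_num) (by omega))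
      omega
    have step : depthLoop (n + 1) n 0 0 = depthLoop n n 1 (2 ^ (1 + 1) - 1) := by
      rw [depthLoop, if_pos (show 0 < n by omega)]
    rw [step, depthLoop_from n hn n 1 le_rfl (le_max_left _ _) (by omega)]
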